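-- pv_equiv track=rewrite | github.com/dlt-hub/dlt | tools/check_dependency_changes.py | diff_deps
-- ===== SOURCE A (Python) =====
-- from typing import Any, Dict, List, NamedTuple, Optional, Sequence, Tuple
--
-- class DepChange(NamedTuple):
--     name: str
--     kind: str  # "added", "removed", "changed"
--     old: List[str]
--     new: List[str]
--
-- def diff_deps(old: Dict[str, List[str]], new: Dict[str, List[str]]) -> List[DepChange]:
--     """Return list of changes between old and new dependency dicts."""
--     changes: List[DepChange] = []
--     for name in sorted(set(old) | set(new)):
--         old_specs = old.get(name, [])
--         new_specs = new.get(name, [])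
--         if not old_specs:
--             changes.append(DepChange(name, "added", [], new_specs))
--         elif not new_specs:
--             changes.append(DepChange(name, "removed", old_specs, []))
--         elif old_specs != new_specs:
--             changes.append(DepChange(name, "changed", old_specs, new_specs))
--     return changes
-- ===== SOURCE B (Python) =====
-- from typing import Dict, List, NamedTuple
--
--
-- class DepChange(NamedTuple):
--     name: str
--     kind: str  # "added", "removed", "changed"
--     old: List[str]
--     new: List[str]
--
--
-- def diff_deps(old: Dict[str, List[str]], new: Dict[str, List[str]]) -> List[DepChange]:
--     """Two-pointer merge of the two independently sorted key lists; classify each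
--     name as it is emitted, so the output is built already sorted and the union is
--     never materialised or re-sorted."""
--     olds = sorted(old)
--     news = sorted(new)
--     out: List[DepChange] = []
--     i = j = 0
--     while i < len(olds) or j < len(news):
--         if j >= len(news) or (i < len(olds) and olds[i] < news[j]):
--             name = olds[i]; i += 1
--         elif i >= len(olds) or news[j] < olds[i]:
--             name = news[j]; j += 1
--         else:
--             name = olds[i]; i += 1; j += 1
--         o = old.get(name, [])
--         n = new.get(name, [])
--         if not o:
--             out.append(DepChange(name, "added", [], n))
--         elif not n:
--             out.append(DepChange(name, "removed", o, []))
--         elif o != n: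
--             out.append(DepChange(name, "changed", o, n))
--     return out
-- ===== Notes on version B (the rewrite author's own statement) =====
-- stated objective: alternative
-- what changed: A materialises the set union of the keys, sorts that union and classifies in a loop over it; B sorts the two key lists separately and does a two-pointer merge of them, classifying each name as the merge emits it, so the union list is never built or sorted.
import Mathlib
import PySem

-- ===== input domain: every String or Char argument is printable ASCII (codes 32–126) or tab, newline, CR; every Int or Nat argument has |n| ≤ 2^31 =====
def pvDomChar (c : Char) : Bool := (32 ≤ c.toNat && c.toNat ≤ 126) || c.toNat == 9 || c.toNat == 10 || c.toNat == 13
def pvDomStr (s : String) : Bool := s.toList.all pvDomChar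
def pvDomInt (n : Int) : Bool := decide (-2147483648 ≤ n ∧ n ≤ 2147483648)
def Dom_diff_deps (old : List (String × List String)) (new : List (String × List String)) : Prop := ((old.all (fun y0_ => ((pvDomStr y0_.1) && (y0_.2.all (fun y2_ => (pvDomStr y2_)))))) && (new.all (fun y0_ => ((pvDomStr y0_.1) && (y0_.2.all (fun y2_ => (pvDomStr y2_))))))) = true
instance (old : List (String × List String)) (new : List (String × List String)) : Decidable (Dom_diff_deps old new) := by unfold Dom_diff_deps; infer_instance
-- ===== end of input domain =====

-- B replaces A's "sort the set-union of keys, then classify each" by a two-pointer merge of the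
-- two independently sorted key lists, classifying each name as the merge emits it
-- (objective: alternative algorithm of the same cost; the union is never built or sorted).

-- d.get(name, []) on the association list (first match); also models the truthiness of
-- d.get(name): missing key (None) and stored [] are both the empty list.
def pvGet (d : List (String × List String)) (n : String) : List String :=
  match d.find? (fun p => p.1 == n) with
  | some p => p.2
  | none => []

-- ===== PORT A =====
def diff_deps (old : List (String × List String)) (new : List (String × List String)) : List (String × String × List String × List String) :=
  (PySem.List.sorted
      (PySem.Set.union (PySem.Set.ofList (old.map Prod.fst)) (PySem.Set.ofList (new.map Prod.fst)))
      (fun x => x) false).foldl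
    (fun changes name =>
      let old_specs := pvGet old name
      let new_specs := pvGet new name
      if old_specs.isEmpty then changes ++ [(name, ("added", (([] : List String), new_specs)))]
      else if new_specs.isEmpty then changes ++ [(name, ("removed", (old_specs, ([] : List String))))]
      else if old_specs ≠ new_specs then changes ++ [(name, ("changed", (old_specs, new_specs)))]
      else changes) []

-- ===== PORT B =====
-- B's while loop: emit the classification of the smaller front name, advance that pointer
-- (both on a tie), until both sorted key lists are exhausted.
-- the classifying append of B's loop body (zero or one DepChange)
def pvEmit (old new : List (String × List String)) (n : String) :
    List (String × String × List String × List String) :=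
  let o := pvGet old n
  let nn := pvGet new n
  if o.isEmpty then [(n, ("added", (([] : List String), nn)))]
  else if nn.isEmpty then [(n, ("removed", (o, ([] : List String))))]
  else if o ≠ nn then [(n, ("changed", (o, nn)))]
  else []

def pvMergeDiff (old : List (String × List String)) (new : List (String × List String)) :
    List String → List String → List (String × String × List String × List String)
  | [], [] => []
  | x :: xs, [] => pvEmit old new x ++ pvMergeDiff old new xs []
  | [], y :: ys => pvEmit old new y ++ pvMergeDiff old new [] ys
  | x :: xs, y :: ys =>
    if x < y then pvEmit old new x ++ pvMergeDiff old new xs (y :: ys)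
    else if y < x then pvEmit old new y ++ pvMergeDiff old new (x :: xs) ys
    else pvEmit old new x ++ pvMergeDiff old new xs ys
termination_by xs ys => xs.length + ys.length

def diff_deps_alt (old : List (String × List String)) (new : List (String × List String)) : List (String × String × List String × List String) :=
  let olds := PySem.List.sorted (PySem.Set.ofList (old.map Prod.fst)) (fun x => x) false
  let news := PySem.List.sorted (PySem.Set.ofList (new.map Prod.fst)) (fun x => x) false
  pvMergeDiff old new olds news

-- ===== PRECONDITION & SPEC =====
def Spec_diff_deps (old : List (String × List String)) (new : List (String × List String)) (out : List (String × String × List String × List String)) : Prop := out = diff_deps_alt old new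
instance (old : List (String × List String)) (new : List (String × List String)) (out : List (String × String × List String × List String)) : Decidable (Spec_diff_deps old new out) := by unfold Spec_diff_deps; infer_instance

-- ===== CLAIM (what is proved, stated in full; the proofs are below) =====
def Claim_equal_diff_deps : Prop := ∀ (old : List (String × List String)) (new : List (String × List String)), Dom_diff_deps old new → Spec_diff_deps old new (diff_deps old new)

-- ===== LEMMAS AND PROOFS =====

-- A's loop body as an Option-valued classifier.
def pvClassify (old : List (String × List String)) (new : List (String × List String)) (n : String) : Option (String × String × List String × List String) :=
  if (pvGet old n).isEmpty then some (n, ("added", (([] : List String), pvGet new n)))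
  else if (pvGet new n).isEmpty then some (n, ("removed", (pvGet old n, ([] : List String))))
  else if pvGet old n ≠ pvGet new n then some (n, ("changed", (pvGet old n, pvGet new n)))
  else none

theorem pvEmit_eq_toList (old new : List (String × List String)) (n : String) :
    pvEmit old new n = (pvClassify old new n).toList := by
  unfold pvEmit pvClassify
  by_cases h1 : (pvGet old n).isEmpty <;> by_cases h2 : (pvGet new n).isEmpty <;>
    by_cases h3 : pvGet old n = pvGet new n <;> simp [h1, h2, h3]

-- A's fold is the filterMap of the classifier.
theorem pvFoldl_classify (old new : List (String × List String)) :
    ∀ (S : List String) (acc : List (String × String × List String × List String)),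
      S.foldl (fun changes name =>
        let old_specs := pvGet old name
        let new_specs := pvGet new name
        if old_specs.isEmpty then changes ++ [(name, ("added", (([] : List String), new_specs)))]
        else if new_specs.isEmpty then changes ++ [(name, ("removed", (old_specs, ([] : List String))))]
        else if old_specs ≠ new_specs then changes ++ [(name, ("changed", (old_specs, new_specs)))]
        else changes) acc
      = acc ++ S.filterMap (pvClassify old new) := by
  intro S
  induction S with
  | nil => intro acc; simp
  | cons u S ih =>
    intro acc
    simp only [List.foldl_cons]
    rw [ih]
    by_cases h1 : pvGet old u = []
    · simp [pvClassify, h1, List.append_assoc]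
    · by_cases h2 : pvGet new u = []
      · simp [pvClassify, h1, h2, List.append_assoc]
      · by_cases h3 : pvGet old u = pvGet new u
        · simp [pvClassify, h2, h3]
        · simp [pvClassify, h1, h2, h3, List.append_assoc]

-- The name merge underlying B's loop.
def pvStrMerge : List String → List String → List String
  | [], [] => []
  | x :: xs, [] => x :: pvStrMerge xs []
  | [], y :: ys => y :: pvStrMerge [] ys
  | x :: xs, y :: ys =>
    if x < y then x :: pvStrMerge xs (y :: ys)
    else if y < x then y :: pvStrMerge (x :: xs) ys
    else x :: pvStrMerge xs ys
termination_by xs ys => xs.length + ys.length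

theorem pvMergeDiff_eq (old new : List (String × List String)) :
    ∀ (xs ys : List String),
      pvMergeDiff old new xs ys = (pvStrMerge xs ys).filterMap (pvClassify old new) := by
  intro xs ys
  induction xs, ys using pvStrMerge.induct with
  | case1 => simp [pvMergeDiff, pvStrMerge]
  | case2 x xs ih =>
    simp [pvMergeDiff, pvStrMerge, ih, pvEmit_eq_toList, List.filterMap_cons]
    cases pvClassify old new x <;> simp
  | case3 y ys ih =>
    simp [pvMergeDiff, pvStrMerge, ih, pvEmit_eq_toList, List.filterMap_cons]
    cases pvClassify old new y <;> simp
  | case4 x xs y ys h ih =>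
    simp [pvMergeDiff, pvStrMerge, h, ih, pvEmit_eq_toList, List.filterMap_cons]
    cases pvClassify old new x <;> simp
  | case5 x xs y ys h1 h2 ih =>
    simp [pvMergeDiff, pvStrMerge, h1, h2, ih, pvEmit_eq_toList, List.filterMap_cons]
    cases pvClassify old new y <;> simp
  | case6 x xs y ys h1 h2 ih =>
    simp [pvMergeDiff, pvStrMerge, h1, h2, ih, pvEmit_eq_toList, List.filterMap_cons]
    cases pvClassify old new x <;> simp

theorem pvMem_strMerge (a : String) :
    ∀ (xs ys : List String), a ∈ pvStrMerge xs ys ↔ a ∈ xs ∨ a ∈ ys := by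
  intro xs ys
  induction xs, ys using pvStrMerge.induct with
  | case1 => simp [pvStrMerge]
  | case2 x xs ih => simp [pvStrMerge, ih]
  | case3 y ys ih => simp [pvStrMerge, ih]
  | case4 x xs y ys h ih => simp [pvStrMerge, h, ih]; tauto
  | case5 x xs y ys h1 h2 ih => simp [pvStrMerge, h1, h2, ih]; tauto
  | case6 x xs y ys h1 h2 ih =>
    have hxy : x = y := le_antisymm (not_lt.mp h2) (not_lt.mp h1)
    simp [pvStrMerge, ih, hxy]
    tauto

theorem pvPairwise_strMerge :
    ∀ (xs ys : List String), xs.Pairwise (· < ·) → ys.Pairwise (· < ·) →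
      (pvStrMerge xs ys).Pairwise (· < ·) := by
  intro xs ys
  induction xs, ys using pvStrMerge.induct with
  | case1 => intro _ _; simp [pvStrMerge]
  | case2 x xs ih =>
    intro hx _
    rw [List.pairwise_cons] at hx
    rw [pvStrMerge, List.pairwise_cons]
    refine ⟨?_, ih hx.2 (by simp)⟩
    intro b hb
    rcases (pvMem_strMerge b xs []).mp hb with h | h
    · exact hx.1 b h
    · simp at h
  | case3 y ys ih =>
    intro _ hy
    rw [List.pairwise_cons] at hy
    rw [pvStrMerge, List.pairwise_cons]
    refine ⟨?_, ih (by simp) hy.2⟩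
    intro b hb
    rcases (pvMem_strMerge b [] ys).mp hb with h | h
    · simp at h
    · exact hy.1 b h
  | case4 x xs y ys h ih =>
    intro hx hy
    rw [List.pairwise_cons] at hx
    rw [pvStrMerge, if_pos h, List.pairwise_cons]
    refine ⟨?_, ih hx.2 hy⟩
    intro b hb
    rcases (pvMem_strMerge b xs (y :: ys)).mp hb with hm | hm
    · exact hx.1 b hm
    · rcases List.mem_cons.mp hm with rfl | hm
      · exact h
      · exact lt_trans h (List.rel_of_pairwise_cons hy hm)
  | case5 x xs y ys h1 h2 ih =>
    intro hx hy
    rw [List.pairwise_cons] at hy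
    rw [pvStrMerge, if_neg h1, if_pos h2, List.pairwise_cons]
    refine ⟨?_, ih hx hy.2⟩
    intro b hb
    rcases (pvMem_strMerge b (x :: xs) ys).mp hb with hm | hm
    · rcases List.mem_cons.mp hm with rfl | hm
      · exact h2
      · exact lt_trans h2 (List.rel_of_pairwise_cons hx hm)
    · exact hy.1 b hm
  | case6 x xs y ys h1 h2 ih =>
    intro hx hy
    have hxy : x = y := le_antisymm (not_lt.mp h2) (not_lt.mp h1)
    rw [List.pairwise_cons] at hx hy
    rw [pvStrMerge, if_neg h1, if_neg h2, List.pairwise_cons]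
    refine ⟨?_, ih hx.2 hy.2⟩
    intro b hb
    rcases (pvMem_strMerge b xs ys).mp hb with hm | hm
    · exact hx.1 b hm
    · exact hxy ▸ hy.1 b hm

-- B's merged key list IS A's sorted union of the keys.
theorem pvStrMerge_eq_sorted_union (old new : List (String × List String)) :
    PySem.List.sorted
        (PySem.Set.union (PySem.Set.ofList (old.map Prod.fst)) (PySem.Set.ofList (new.map Prod.fst)))
        (fun x => x) false
      = pvStrMerge
          (PySem.List.sorted (PySem.Set.ofList (old.map Prod.fst)) (fun x => x) false)
          (PySem.List.sorted (PySem.Set.ofList (new.map Prod.fst)) (fun x => x) false) := by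
  have hunion : PySem.Set.union (PySem.Set.ofList (old.map Prod.fst)) (PySem.Set.ofList (new.map Prod.fst))
      = PySem.Set.ofList (old.map Prod.fst ++ new.map Prod.fst) := by
    rw [PySem.Set.ofList_append]
    show PySem.Set.update _ _ = PySem.Set.update _ _
    rw [PySem.Set.update_eq_append_filter, PySem.Set.update_eq_append_filter,
      PySem.Set.ofList_ofList]
  set olds := PySem.List.sorted (PySem.Set.ofList (old.map Prod.fst)) (fun x => x) false with holds
  set news := PySem.List.sorted (PySem.Set.ofList (new.map Prod.fst)) (fun x => x) false with hnews
  have hpo : olds.Pairwise (· < ·) := PySem.List.sorted_ofList_pairwise_lt _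
  have hpn : news.Pairwise (· < ·) := PySem.List.sorted_ofList_pairwise_lt _
  have hpw : (pvStrMerge olds news).Pairwise (· < ·) := pvPairwise_strMerge olds news hpo hpn
  rw [hunion]
  refine PySem.List.sorted_eq_of_perm_of_pairwise_lt _ _ (fun x => x) ?_ hpw
  refine (List.perm_ext_iff_of_nodup (hpw.imp ne_of_lt) (PySem.Set.nodup_ofList _)).mpr ?_
  intro a
  rw [pvMem_strMerge, holds, hnews, PySem.List.mem_sorted, PySem.List.mem_sorted,
    PySem.Set.mem_ofList, PySem.Set.mem_ofList, PySem.Set.mem_ofList, List.mem_append]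

-- ===== VERDICT (by name: the statement is the Claim_ definition above) =====
theorem diff_deps_spec : Claim_equal_diff_deps := by
  unfold Claim_equal_diff_deps Spec_diff_deps
  intro old new _
  unfold diff_deps diff_deps_alt
  rw [pvFoldl_classify, List.nil_append, pvMergeDiff_eq, pvStrMerge_eq_sorted_union]
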